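-- pv_equiv track=rewrite | github.com/bigalex74/trade | ai_prompt_log_analyzer.py | section_lengths
-- ===== SOURCE A (Python) =====
-- MARKERS = [
--     "KB:",
--     "DNA:",
--     "Cash:",
--     "Portfolio:",
--     "History:",
--     "REGIME:",
--     "META_CONSENSUS:",
--     "MARKET_FEATURES:",
--     "MANDATE:",
--     "Respond ONLY raw JSON:",
-- ]
--
-- def section(prompt: str, marker: str) -> str:
--     start = prompt.find(marker)
--     if start < 0:
--         return ""
--     start += len(marker)
--     ends = [prompt.find(next_marker, start) for next_marker in MARKERS if prompt.find(next_marker, start) >= 0]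
--     end = min(ends) if ends else len(prompt)
--     return prompt[start:end].strip(" .")
--
-- def section_lengths(prompt: str) -> dict[str, int]:
--     lengths = {}
--     first_positions = [prompt.find(marker) for marker in MARKERS if prompt.find(marker) >= 0]
--     lengths["prefix"] = min(first_positions) if first_positions else len(prompt)
--     for marker in MARKERS:
--         value = section(prompt, marker)
--         if value:
--             lengths[marker.rstrip(":")] = len(value)
--     return lengths
-- ===== SOURCE B (Python) =====
-- MARKERS = [
--     "KB:",
--     "DNA:",
--     "Cash:",
--     "Portfolio:",
--     "History:",
--     "REGIME:",
--     "META_CONSENSUS:",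
--     "MARKET_FEATURES:",
--     "MANDATE:",
--     "Respond ONLY raw JSON:",
-- ]
--
-- def section_lengths(prompt: str) -> dict:
--     # One pass over positions builds an index of ALL marker-occurrence start
--     # positions; every find() of A becomes a lookup in that increasing list.
--     n = len(prompt)
--     occ = [i for i in range(n) if any(prompt[i:i + len(m)] == m for m in MARKERS)]
--     lengths = {"prefix": occ[0] if occ else n}
--     for m in MARKERS:
--         first = next((i for i in occ if prompt[i:i + len(m)] == m), None)
--         if first is None:
--             continue
--         start = first + len(m)
--         end = next((i for i in occ if i >= start), n)
--         value = prompt[start:end].strip(" .")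
--         if value:
--             lengths[m.rstrip(":")] = len(value)
--     return lengths
-- ===== Notes on version B (the rewrite author's own statement) =====
-- stated objective: alternative
-- what changed: B scans the prompt once to build a single increasing index of all marker-occurrence positions and answers every substring search of A (prefix, each marker's first hit, each section's end) by lookups in that index, instead of A's repeated nested str.find scans.
import Mathlib
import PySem

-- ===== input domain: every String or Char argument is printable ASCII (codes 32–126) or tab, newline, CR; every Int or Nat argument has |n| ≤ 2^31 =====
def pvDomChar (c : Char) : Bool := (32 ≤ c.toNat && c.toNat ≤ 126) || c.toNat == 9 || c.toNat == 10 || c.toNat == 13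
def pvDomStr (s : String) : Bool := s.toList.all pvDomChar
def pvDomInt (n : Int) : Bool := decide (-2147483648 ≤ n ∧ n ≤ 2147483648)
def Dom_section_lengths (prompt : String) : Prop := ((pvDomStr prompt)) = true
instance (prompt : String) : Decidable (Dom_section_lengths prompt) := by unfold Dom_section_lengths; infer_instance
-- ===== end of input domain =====

-- B replaces A's repeated nested substring searches by one index of all marker-occurrence
-- positions, answered by lookups in that increasing list (objective: alternative).

def MARKERS : List String :=
  ["KB:", "DNA:", "Cash:", "Portfolio:", "History:", "REGIME:", "META_CONSENSUS:",
   "MARKET_FEATURES:", "MANDATE:", "Respond ONLY raw JSON:"]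

-- hand port of str.rstrip(chars): drop trailing characters belonging to chars (exact; PySem has no rstrip-with-chars)
def pvRstrip (s : String) (chars : List Char) : String :=
  String.ofList ((s.toList.reverse.dropWhile (fun c => chars.contains c)).reverse)

-- ===== PORT A =====
def sectionA (prompt marker : String) : String :=
  let start := PySem.Str.find prompt marker
  if start < 0 then ""
  else
    let start := start + PySem.Str.len marker
    let ends := MARKERS.filterMap (fun nm =>
      if 0 ≤ PySem.Str.findFrom prompt nm start none then
        some (PySem.Str.findFrom prompt nm start none) else none)
    let endPos := match PySem.List.min? ends (fun x => x) with
      | some e => e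
      | none => PySem.Str.len prompt
    PySem.Str.stripChars (PySem.Str.slice prompt (some start) (some endPos)) " ."

def section_lengths (prompt : String) : List (String × Int) :=
  let first_positions := MARKERS.filterMap (fun m =>
    if 0 ≤ PySem.Str.find prompt m then some (PySem.Str.find prompt m) else none)
  let lengths : PySem.Dict String Int :=
    PySem.Dict.empty.insert "prefix"
      (match PySem.List.min? first_positions (fun x => x) with
       | some v => v
       | none => PySem.Str.len prompt)
  (MARKERS.foldl (fun d marker =>
    let value := sectionA prompt marker
    if value ≠ "" then d.insert (pvRstrip marker [':']) (PySem.Str.len value) else d) lengths).items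

-- ===== PORT B =====
-- prompt[i:i+len(m)] == m
def pvMatchesAt (prompt : String) (i : Int) (m : String) : Bool :=
  PySem.Str.slice prompt (some i) (some (i + PySem.Str.len m)) == m

def section_lengths_alt (prompt : String) : List (String × Int) :=
  let n := PySem.Str.len prompt
  let occ := (PySem.List.pyRange 0 n).filter (fun i => MARKERS.any (fun m => pvMatchesAt prompt i m))
  let lengths : PySem.Dict String Int :=
    PySem.Dict.empty.insert "prefix" (match occ.head? with | some i => i | none => n)
  (MARKERS.foldl (fun d m =>
    match occ.find? (fun i => pvMatchesAt prompt i m) with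
    | none => d
    | some first =>
      let start := first + PySem.Str.len m
      let endPos := match occ.find? (fun i => decide (start ≤ i)) with
        | some e => e
        | none => n
      let value := PySem.Str.stripChars (PySem.Str.slice prompt (some start) (some endPos)) " ."
      if value ≠ "" then d.insert (pvRstrip m [':']) (PySem.Str.len value) else d) lengths).items

-- ===== PRECONDITION & SPEC =====
def Spec_section_lengths (prompt : String) (out : List (String × Int)) : Prop := out = section_lengths_alt prompt
instance (prompt : String) (out : List (String × Int)) : Decidable (Spec_section_lengths prompt out) := by unfold Spec_section_lengths; infer_instance

-- ===== CLAIM (what is proved, stated in full; the proofs are below) =====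
def Claim_equal_section_lengths : Prop := ∀ (prompt : String), Dom_section_lengths prompt → Spec_section_lengths prompt (section_lengths prompt)

-- ===== LEMMAS AND PROOFS =====

-- the combined "some marker occurs at position i" test of B
def pvQ (prompt : String) : Int → Bool := fun i => MARKERS.any (fun m => pvMatchesAt prompt i m)

-- B's index: all marker-occurrence positions, increasing
def pvOcc (prompt : String) : List Int :=
  (PySem.List.pyRange 0 (PySem.Str.len prompt)).filter (pvQ prompt)

theorem pv_markers_ne_nil : ∀ m ∈ MARKERS, m.toList ≠ [] := by decide

/-- `prompt[i:i+len(m)] == m` at a Nat position is exactly "m occurs at i". -/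
theorem pv_matchesAt_iff (prompt m : String) (j : Nat) :
    pvMatchesAt prompt (j : Int) m = true ↔ m.toList <+: prompt.toList.drop j := by
  unfold pvMatchesAt
  rw [beq_iff_eq, ← String.toList_inj, PySem.Str.toList_slice, PySem.Chars.slice_eq_listSlice]
  have h0b : (0 : Int) ≤ (j : Int) + PySem.Str.len m := by
    rw [PySem.Str.len_eq]; positivity
  rw [PySem.List.slice_toNat prompt.toList (by positivity) h0b]
  have h1 : ((j : Int) + PySem.Str.len m).toNat - ((j : Int)).toNat = m.toList.length := by
    simp [PySem.Str.len_eq]; omega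
  rw [h1]
  constructor
  · intro h; rw [← h]; exact List.take_prefix _ _
  · intro h; exact (List.prefix_iff_eq_take.mp h).symm

/-- a prefix of a tail of l occurs inside l -/
theorem pv_prefix_drop_infix {m l : List Char} {k : Nat} (h : m <+: l.drop k) : m <:+: l :=
  h.isInfix.trans (List.drop_suffix k l).isInfix

/-- an occurrence of a nonempty word at j lies strictly inside the string -/
theorem pv_occ_lt_length {m l : List Char} {j : Nat} (hm : m ≠ []) (h : m <+: l.drop j) :
    j < l.length := by
  by_contra hc
  rw [List.drop_eq_nil_iff.mpr (by omega)] at h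
  exact hm (List.prefix_nil.mp h)

/-- find? over `range(0,n)` returns the least witness -/
theorem pv_find?_pyRange_eq_some {n : Nat} {q : Int → Bool} {j : Nat} (hj : j < n)
    (hq : q (j : Int) = true) (hmin : ∀ i : Nat, i < j → q (i : Int) = false) :
    (PySem.List.pyRange 0 (n : Int)).find? q = some (j : Int) := by
  rw [PySem.List.pyRange_one_append 0 (j : Int) (n : Int) (by positivity) (by exact_mod_cast hj.le),
    List.find?_append]
  have h1 : (PySem.List.pyRange 0 (j : Int)).find? q = none := by
    rw [List.find?_eq_none]
    intro x hx
    rw [PySem.List.mem_pyRange_one] at hx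
    have hx' : x = ((x.toNat : Nat) : Int) := by omega
    rw [hx', hmin x.toNat (by omega)]
    simp
  rw [h1, Option.none_or, PySem.List.pyRange_one_cons (by exact_mod_cast hj),
    List.find?_cons_of_pos hq]

theorem pv_find?_pyRange_eq_none {n : Nat} {q : Int → Bool}
    (h : ∀ i : Nat, i < n → q (i : Int) = false) :
    (PySem.List.pyRange 0 (n : Int)).find? q = none := by
  rw [List.find?_eq_none]
  intro x hx
  rw [PySem.List.mem_pyRange_one] at hx
  have hx' : x = ((x.toNat : Nat) : Int) := by omega
  rw [hx', h x.toNat (by omega)]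
  simp

/-- the "next occurrence at or after start": A's min of per-marker finds = B's lookup in the index -/
theorem pv_end_eq (prompt : String) (start : Nat) (hs : start ≤ prompt.toList.length) :
    (match PySem.List.min? (MARKERS.filterMap (fun nm =>
        if 0 ≤ PySem.Str.findFrom prompt nm (start : Int) none then
          some (PySem.Str.findFrom prompt nm (start : Int) none) else none)) (fun x => x) with
      | some e => e
      | none => PySem.Str.len prompt)
    = (match (pvOcc prompt).find? (fun i => decide ((start : Int) ≤ i)) with
      | some e => e
      | none => PySem.Str.len prompt) := by
  have hN : PySem.Str.len prompt = ((prompt.toList.length : Nat) : Int) := by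
    simp [PySem.Str.len_eq]
  by_cases hE : ∃ i : Nat, (start ≤ i ∧ i < prompt.toList.length) ∧ pvQ prompt (i : Int) = true
  · -- there is an occurrence at or after start; let j be the least one
    set j := Nat.find hE with hjdef
    obtain ⟨⟨hsj, hjn⟩, hqj⟩ := Nat.find_spec hE
    -- B side: the index lookup returns j
    have hB : (pvOcc prompt).find? (fun i => decide ((start : Int) ≤ i)) = some (j : Int) := by
      rw [pvOcc, hN, List.find?_filter]
      apply pv_find?_pyRange_eq_some hjn
      · simp only [decide_eq_true_eq]
        exact ⟨hqj, by exact_mod_cast hsj⟩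
      · intro i hij
        by_cases hsi : start ≤ i
        · have hni : ¬ ((start ≤ i ∧ i < prompt.toList.length) ∧ pvQ prompt (i : Int) = true) :=
            Nat.find_min hE hij
          simp only [decide_eq_false_iff_not]
          intro hcon
          exact hni ⟨⟨hsi, by omega⟩, hcon.1⟩
        · simp only [decide_eq_false_iff_not]
          intro hcon
          have : ((start : Int)) ≤ (i : Int) := of_decide_eq_true hcon.2
          exact hsi (by exact_mod_cast this)
    -- a marker witnessing the occurrence at j
    obtain ⟨m', hm'mem, hm'match⟩ := List.any_eq_true.mp hqj
    have hpre : m'.toList <+: prompt.toList.drop j := (pv_matchesAt_iff prompt m' j).mp hm'match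
    -- A side: findFrom for that marker returns j, and every other find is ≥ j
    have hne : PySem.Str.findFrom prompt m' (start : Int) none ≠ -1 := by
      rw [PySem.Str.findFrom_eq]
      intro heq
      have hinf := (PySem.Chars.findFrom_natCast_eq_neg_one_iff prompt.toList m'.toList start hs).mp heq
      apply hinf
      have hdj : prompt.toList.drop j = (prompt.toList.drop start).drop (j - start) := by
        rw [List.drop_drop]; congr 1; omega
      exact pv_prefix_drop_infix (hdj ▸ hpre)
    have hspec := PySem.Chars.findFrom_natCast_spec prompt.toList m'.toList start hs
      (by rwa [PySem.Str.findFrom_eq] at hne)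
    rw [← PySem.Str.findFrom_eq] at hspec
    obtain ⟨hge, hocc, hmin'⟩ := hspec
    set F := PySem.Str.findFrom prompt m' (start : Int) none with hFdef
    have hF0 : (0 : Int) ≤ F := le_trans (by positivity) hge
    have hFn : F.toNat < prompt.toList.length :=
      pv_occ_lt_length (pv_markers_ne_nil m' hm'mem) hocc
    have hjF : j ≤ F.toNat := by
      apply Nat.find_min' hE
      refine ⟨⟨by omega, hFn⟩, ?_⟩
      exact List.any_eq_true.mpr ⟨m', hm'mem, (pv_matchesAt_iff prompt m' F.toNat).mpr hocc⟩
    have hFj : F.toNat ≤ j := by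
      by_contra hc
      exact hmin' j hsj (by omega) hpre
    have hFeq : F = (j : Int) := by omega
    -- j is in ends, and is a lower bound of ends
    have hmem : (j : Int) ∈ MARKERS.filterMap (fun nm =>
        if 0 ≤ PySem.Str.findFrom prompt nm (start : Int) none then
          some (PySem.Str.findFrom prompt nm (start : Int) none) else none) := by
      refine List.mem_filterMap.mpr ⟨m', hm'mem, ?_⟩
      rw [← hFdef, hFeq]
      simp
    have hlow : ∀ y ∈ MARKERS.filterMap (fun nm =>
        if 0 ≤ PySem.Str.findFrom prompt nm (start : Int) none then
          some (PySem.Str.findFrom prompt nm (start : Int) none) else none), (j : Int) ≤ y := by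
      intro y hy
      obtain ⟨nm, hnm, hyeq⟩ := List.mem_filterMap.mp hy
      by_cases h0 : 0 ≤ PySem.Str.findFrom prompt nm (start : Int) none
      · rw [if_pos h0, Option.some_inj] at hyeq
        have hney : PySem.Str.findFrom prompt nm (start : Int) none ≠ -1 := by omega
        have hspecy := PySem.Chars.findFrom_natCast_spec prompt.toList nm.toList start hs
          (by rwa [PySem.Str.findFrom_eq] at hney)
        rw [← PySem.Str.findFrom_eq] at hspecy
        obtain ⟨hgey, hoccy, _⟩ := hspecy
        have hyn : (PySem.Str.findFrom prompt nm (start : Int) none).toNat < prompt.toList.length :=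
          pv_occ_lt_length (pv_markers_ne_nil nm hnm) hoccy
        have hjy : j ≤ (PySem.Str.findFrom prompt nm (start : Int) none).toNat := by
          apply Nat.find_min' hE
          refine ⟨⟨by omega, hyn⟩, ?_⟩
          exact List.any_eq_true.mpr ⟨nm, hnm, (pv_matchesAt_iff prompt nm _).mpr hoccy⟩
        omega
      · rw [if_neg h0] at hyeq
        exact absurd hyeq (by simp)
    -- hence the min is j
    have hA : PySem.List.min? (MARKERS.filterMap (fun nm =>
        if 0 ≤ PySem.Str.findFrom prompt nm (start : Int) none then
          some (PySem.Str.findFrom prompt nm (start : Int) none) else none)) (fun x => x)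
        = some (j : Int) := by
      cases hmq : PySem.List.min? (MARKERS.filterMap (fun nm =>
          if 0 ≤ PySem.Str.findFrom prompt nm (start : Int) none then
            some (PySem.Str.findFrom prompt nm (start : Int) none) else none)) (fun x => x) with
      | none =>
        rw [PySem.List.min?_eq_none_iff] at hmq
        rw [hmq] at hmem
        exact absurd hmem (List.not_mem_nil)
      | some v =>
        have hv1 : v ≤ (j : Int) := PySem.List.min?_isMin hmq _ hmem
        have hv2 : (j : Int) ≤ v := hlow v (PySem.List.min?_mem hmq)
        rw [show v = (j : Int) by omega]
    rw [hA, hB]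
  · -- no occurrence at or after start: ends is empty, the lookup misses
    push Not at hE
    have hB : (pvOcc prompt).find? (fun i => decide ((start : Int) ≤ i)) = none := by
      rw [pvOcc, hN, List.find?_filter]
      apply pv_find?_pyRange_eq_none
      intro i hin
      simp only [decide_eq_false_iff_not]
      intro hcon
      have hsi' : ((start : Int)) ≤ (i : Int) := of_decide_eq_true hcon.2
      have hsi : start ≤ i := by exact_mod_cast hsi'
      exact absurd hcon.1 (hE i ⟨hsi, hin⟩)
    have hA : MARKERS.filterMap (fun nm =>
        if 0 ≤ PySem.Str.findFrom prompt nm (start : Int) none then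
          some (PySem.Str.findFrom prompt nm (start : Int) none) else none) = [] := by
      rw [List.filterMap_eq_nil_iff]
      intro nm hnm
      by_cases h0 : 0 ≤ PySem.Str.findFrom prompt nm (start : Int) none
      case neg => rw [if_neg h0]
      exfalso
      have hney : PySem.Str.findFrom prompt nm (start : Int) none ≠ -1 := by omega
      have hspecy := PySem.Chars.findFrom_natCast_spec prompt.toList nm.toList start hs
        (by rwa [PySem.Str.findFrom_eq] at hney)
      rw [← PySem.Str.findFrom_eq] at hspecy
      obtain ⟨hgey, hoccy, _⟩ := hspecy
      have hyn : (PySem.Str.findFrom prompt nm (start : Int) none).toNat < prompt.toList.length :=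
        pv_occ_lt_length (pv_markers_ne_nil nm hnm) hoccy
      have hq : pvQ prompt (((PySem.Str.findFrom prompt nm (start : Int) none).toNat : Nat) : Int) = true :=
        List.any_eq_true.mpr ⟨nm, hnm, (pv_matchesAt_iff prompt nm _).mpr hoccy⟩
      exact (hE _ ⟨by omega, hyn⟩) hq
    rw [hA, hB, (PySem.List.min?_eq_none_iff ([] : List Int) (fun x : Int => x)).mpr rfl]

/-- B's first-occurrence lookup for a marker agrees with A's find (when it hits) -/
theorem pv_first_some (prompt m : String) (hm : m ∈ MARKERS)
    (h0 : 0 ≤ PySem.Str.find prompt m) :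
    (pvOcc prompt).find? (fun i => pvMatchesAt prompt i m) = some (PySem.Str.find prompt m) := by
  have hN : PySem.Str.len prompt = ((prompt.toList.length : Nat) : Int) := by
    simp [PySem.Str.len_eq]
  have hspec := PySem.Chars.find_spec (s := prompt.toList) (sub := m.toList)
    (by rwa [← PySem.Str.find_eq])
  rw [← PySem.Str.find_eq] at hspec
  obtain ⟨hocc, hmin⟩ := hspec
  have hjn : (PySem.Str.find prompt m).toNat < prompt.toList.length :=
    pv_occ_lt_length (pv_markers_ne_nil m hm) hocc
  have heq : ((((PySem.Str.find prompt m).toNat : Nat)) : Int) = PySem.Str.find prompt m := by omega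
  rw [pvOcc, hN, List.find?_filter, ← heq]
  apply pv_find?_pyRange_eq_some hjn
  · simp only [decide_eq_true_eq]
    refine ⟨?_, (pv_matchesAt_iff prompt m _).mpr hocc⟩
    exact List.any_eq_true.mpr ⟨m, hm, (pv_matchesAt_iff prompt m _).mpr hocc⟩
  · intro i hij
    simp only [decide_eq_false_iff_not]
    intro hcon
    exact hmin i hij ((pv_matchesAt_iff prompt m i).mp hcon.2)

theorem pv_first_none (prompt m : String) (hneg : PySem.Str.find prompt m < 0) :
    (pvOcc prompt).find? (fun i => pvMatchesAt prompt i m) = none := by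
  have hN : PySem.Str.len prompt = ((prompt.toList.length : Nat) : Int) := by
    simp [PySem.Str.len_eq]
  have hni : ¬ m.toList <:+: prompt.toList := by
    rw [← PySem.Chars.find_eq_neg_one_iff, ← PySem.Str.find_eq]
    have h := PySem.Chars.neg_one_le_find prompt.toList m.toList
    rw [← PySem.Str.find_eq] at h
    omega
  rw [pvOcc, hN, List.find?_filter]
  apply pv_find?_pyRange_eq_none
  intro i hin
  simp only [decide_eq_false_iff_not]
  intro hcon
  exact hni (pv_prefix_drop_infix ((pv_matchesAt_iff prompt m i).mp hcon.2))

/-- B's head-of-index prefix value = A's min of first positions -/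
theorem pv_prefix_eq (prompt : String) :
    (match PySem.List.min? (MARKERS.filterMap (fun m =>
        if 0 ≤ PySem.Str.find prompt m then some (PySem.Str.find prompt m) else none)) (fun x => x) with
      | some v => v
      | none => PySem.Str.len prompt)
    = (match (pvOcc prompt).head? with | some i => i | none => PySem.Str.len prompt) := by
  have h := pv_end_eq prompt 0 (Nat.zero_le _)
  simp only [Nat.cast_zero] at h
  rw [show (fun nm : String => if 0 ≤ PySem.Str.findFrom prompt nm 0 none then
        some (PySem.Str.findFrom prompt nm 0 none) else none)
      = (fun m : String => if 0 ≤ PySem.Str.find prompt m then some (PySem.Str.find prompt m) else none)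
    from funext (fun nm => by simp)] at h
  rw [h]
  have hh : (pvOcc prompt).find? (fun i => decide ((0 : Int) ≤ i)) = (pvOcc prompt).head? := by
    cases hocc : pvOcc prompt with
    | nil => rfl
    | cons x t =>
      have hx : x ∈ pvOcc prompt := by rw [hocc]; exact List.mem_cons_self
      rw [pvOcc] at hx
      have hx0 := (List.mem_filter.mp hx).1
      rw [PySem.List.mem_pyRange_one] at hx0
      rw [List.find?_cons_of_pos (by simpa using hx0.1), List.head?_cons]
  rw [hh]

-- ===== VERDICT (by name: the statement is the Claim_ definition above) =====
theorem section_lengths_spec : Claim_equal_section_lengths := by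
  intro prompt _
  unfold Spec_section_lengths
  simp only [section_lengths, section_lengths_alt]
  rw [pv_prefix_eq prompt]
  have hfold : (List.filter (fun i => MARKERS.any fun m => pvMatchesAt prompt i m)
      (PySem.List.pyRange 0 (PySem.Str.len prompt))) = pvOcc prompt := rfl
  rw [hfold]
  apply congrArg PySem.Dict.items
  apply PySem.List.foldl_congr_mem
  intro d m hm
  by_cases hlt : PySem.Str.find prompt m < 0
  · rw [show (pvOcc prompt).find? (fun i => pvMatchesAt prompt i m) = none
      from pv_first_none prompt m hlt]
    have hA : sectionA prompt m = "" := by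
      simp only [sectionA]
      rw [if_pos hlt]
    rw [hA]
    simp
  · have h0 : 0 ≤ PySem.Str.find prompt m := by omega
    rw [show (pvOcc prompt).find? (fun i => pvMatchesAt prompt i m)
        = some (PySem.Str.find prompt m) from pv_first_some prompt m hm h0]
    have hspec := PySem.Chars.find_spec (s := prompt.toList) (sub := m.toList)
      (by rwa [← PySem.Str.find_eq])
    rw [← PySem.Str.find_eq] at hspec
    have hlen := hspec.1.length_le
    rw [List.length_drop] at hlen
    have hfl := PySem.Chars.find_le_length prompt.toList m.toList
    rw [← PySem.Str.find_eq] at hfl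
    have hbound : (PySem.Str.find prompt m + PySem.Str.len m).toNat ≤ prompt.toList.length := by
      rw [PySem.Str.len_eq]; omega
    have hcast : (((PySem.Str.find prompt m + PySem.Str.len m).toNat : Nat) : Int)
        = PySem.Str.find prompt m + PySem.Str.len m := by
      rw [PySem.Str.len_eq]; omega
    have hend := pv_end_eq prompt (PySem.Str.find prompt m + PySem.Str.len m).toNat hbound
    rw [hcast] at hend
    simp only [sectionA, if_neg (not_lt.mpr h0)]
    rw [hend]
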